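-- pv_equiv track=rewrite | github.com/Emrys-Merlin/advent_of_code | 2023/python/day13.py | palindrome_offsets
-- ===== SOURCE A (Python) =====
-- def palindrome_offsets(line: list[str], seeds: list[int]) -> list[int]:
--     """Check if the line is a palindrome at the given seeds
--     Args:
--         line: Line to check
--         seeds: Seeds to check
--
--     Returns:
--         Reduced seeds that are still palindromes
--     """
--     reduced_seeds: list[int] = []
--     for seed in seeds:
--         for i in range(min(seed, len(line) - seed)):
--             if line[seed - i - 1] != line[seed + i]:
--                 break
--         else:
--             reduced_seeds.append(seed)
--
--     return reduced_seeds
-- ===== SOURCE B (Python) =====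
-- def palindrome_offsets(line: list[str], seeds: list[int]) -> list[int]:
--     """Keep the seeds around which line is a full mirror axis (slice comparison)."""
--     n = len(line)
--     return [s for s in seeds
--             if (k := min(s, n - s)) <= 0 or line[s - k:s] == line[s:s + k][::-1]]
-- ===== Notes on version B (the rewrite author's own statement) =====
-- stated objective: idiomatic
-- what changed: A's per-seed index loop with an early break inside a for/else is replaced by a single comprehension that tests each axis with one slice comparison line[s-k:s] == line[s:s+k][::-1] (no inner index loop, no break/else).
import Mathlib
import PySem

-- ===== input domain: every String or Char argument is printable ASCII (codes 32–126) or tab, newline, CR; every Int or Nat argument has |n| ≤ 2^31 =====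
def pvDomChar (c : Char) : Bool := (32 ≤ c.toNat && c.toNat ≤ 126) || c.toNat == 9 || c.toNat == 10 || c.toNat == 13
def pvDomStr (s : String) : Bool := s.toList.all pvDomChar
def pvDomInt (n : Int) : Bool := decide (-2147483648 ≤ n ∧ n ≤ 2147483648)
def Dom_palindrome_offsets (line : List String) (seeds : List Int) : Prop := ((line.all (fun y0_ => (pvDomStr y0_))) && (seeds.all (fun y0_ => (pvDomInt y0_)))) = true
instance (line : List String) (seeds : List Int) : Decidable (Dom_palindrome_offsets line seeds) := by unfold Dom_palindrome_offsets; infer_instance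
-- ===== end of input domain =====

-- B replaces A's inner index loop with break/else by a single slice comparison per seed (idiomatic).

-- ===== PORT A =====
-- inner 'for i in range(...): if line[seed-i-1] != line[seed+i]: break / else: append' — returns true iff the loop
-- finished without break.  (line[..] ported as pyGet?; on the loop's range both indices are always in range.)
def pvInnerA (L : List String) (seed : Int) : List Int → Bool
  | [] => true
  | i :: rest =>
      if PySem.List.pyGet? L (seed - i - 1) ≠ PySem.List.pyGet? L (seed + i) then false
      else pvInnerA L seed rest

def palindrome_offsets (line : List String) (seeds : List Int) : List Int :=
  seeds.foldl (fun reduced_seeds seed =>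
    if pvInnerA line seed (PySem.List.pyRange 0 (min seed ((line.length : Int) - seed)) 1)
    then reduced_seeds ++ [seed] else reduced_seeds) []

-- ===== PORT B =====
-- [s for s in seeds if (k := min(s, n-s)) <= 0 or line[s-k:s] == line[s:s+k][::-1]]
-- ([::-1] ported as List.reverse, per PySem.List.slice?_none_none_neg_one)
def palindrome_offsets_alt (line : List String) (seeds : List Int) : List Int :=
  let n : Int := line.length
  seeds.filter (fun s =>
    let k := min s (n - s)
    decide (k ≤ 0) ||
      (PySem.List.slice line (some (s - k)) (some s)
        == (PySem.List.slice line (some s) (some (s + k))).reverse))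

-- ===== PRECONDITION & SPEC =====
def Spec_palindrome_offsets (line : List String) (seeds : List Int) (out : List Int) : Prop := out = palindrome_offsets_alt line seeds
instance (line : List String) (seeds : List Int) (out : List Int) : Decidable (Spec_palindrome_offsets line seeds out) := by unfold Spec_palindrome_offsets; infer_instance

-- ===== CLAIM (what is proved, stated in full; the proofs are below) =====
def Claim_equal_palindrome_offsets : Prop := ∀ (line : List String) (seeds : List Int), Dom_palindrome_offsets line seeds → Spec_palindrome_offsets line seeds (palindrome_offsets line seeds)

-- ===== LEMMAS AND PROOFS =====

-- A's inner loop is an 'all' over its range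
lemma pvInnerA_eq_all (L : List String) (seed : Int) (l : List Int) :
    pvInnerA L seed l
      = l.all (fun i => PySem.List.pyGet? L (seed - i - 1) == PySem.List.pyGet? L (seed + i)) := by
  induction l with
  | nil => rfl
  | cons i rest ih =>
      simp only [pvInnerA, List.all_cons, ih]
      by_cases h : PySem.List.pyGet? L (seed - i - 1) = PySem.List.pyGet? L (seed + i) <;>
        simp [h]

-- the slice comparison characterised index-wise (the bridge both per-seed tests meet at)
lemma pvMirror_iff (L : List String) (S K : Nat) (hK : 0 < K) (hKS : K ≤ S)
    (hSK : S + K ≤ L.length) :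
    ((L.drop (S - K)).take K = ((L.drop S).take K).reverse)
      ↔ (∀ j, j < K → L[S - 1 - j]? = L[S + j]?) := by
  have hlen1 : ((L.drop (S - K)).take K).length = K := by
    simp [List.length_take, List.length_drop]; omega
  have hlen2 : (((L.drop S).take K).reverse).length = K := by
    simp [List.length_take, List.length_drop]; omega
  have hX : ∀ (j : Nat) (hj : j < K),
      ((L.drop (S - K)).take K)[j]'(by omega) = L[S - K + j]'(by omega) := by
    intro j hj
    rw [List.getElem_take, List.getElem_drop]
  have hY : ∀ (j : Nat) (hj : j < K),
      (((L.drop S).take K).reverse)[j]'(by omega)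
        = L[S + (K - 1 - j)]'(by omega) := by
    intro j hj
    have h' : ((L.drop S).take K).length = K := by
      simp [List.length_take, List.length_drop]; omega
    rw [List.getElem_reverse, List.getElem_take, List.getElem_drop]
    exact getElem_congr_idx (by omega)
  constructor
  · intro h j hj
    have he := List.getElem_of_eq h (by omega : K - 1 - j < ((L.drop (S - K)).take K).length)
    rw [hX _ (by omega), hY _ (by omega)] at he
    rw [List.getElem?_eq_getElem (by omega : S - 1 - j < L.length),
        List.getElem?_eq_getElem (by omega : S + j < L.length)]
    exact congrArg some
      (((getElem_congr_idx (by omega : S - K + (K - 1 - j) = S - 1 - j)).symm.trans he).trans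
        (getElem_congr_idx (by omega : S + (K - 1 - (K - 1 - j)) = S + j)))
  · intro h
    apply List.ext_getElem (by omega)
    intro j h1 h2
    have hj : j < K := by omega
    rw [hX _ hj, hY _ hj]
    have hh := h (K - 1 - j) (by omega)
    rw [List.getElem?_eq_getElem (by omega : S - 1 - (K - 1 - j) < L.length),
        List.getElem?_eq_getElem (by omega : S + (K - 1 - j) < L.length)] at hh
    exact (getElem_congr_idx (by omega : S - 1 - (K - 1 - j) = S - K + j)).symm.trans
      (Option.some.inj hh)

-- the two per-seed tests agree
lemma pvTest_eq (L : List String) (s : Int) :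
    pvInnerA L s (PySem.List.pyRange 0 (min s ((L.length : Int) - s)) 1)
      = (decide (min s ((L.length : Int) - s) ≤ 0) ||
          (PySem.List.slice L (some (s - min s ((L.length : Int) - s))) (some s)
            == (PySem.List.slice L (some s) (some (s + min s ((L.length : Int) - s)))).reverse)) := by
  by_cases hk : min s ((L.length : Int) - s) ≤ 0
  · have h1 : PySem.List.pyRange 0 (min s ((L.length : Int) - s)) 1 = [] := by
      rw [PySem.List.pyRange_one]
      rw [show (min s ((L.length : Int) - s) - 0).toNat = 0 from by omega]
      rfl
    simp [h1, pvInnerA, hk]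
  · rw [not_le] at hk
    have hks : min s ((L.length : Int) - s) ≤ s := min_le_left _ _
    have hkn : min s ((L.length : Int) - s) ≤ (L.length : Int) - s := min_le_right _ _
    set S := s.toNat with hS
    set K := (min s ((L.length : Int) - s)).toNat with hKdef
    have hsS : s = (S : Int) := by omega
    have hkK : min s ((L.length : Int) - s) = (K : Int) := by omega
    have hK : 0 < K := by omega
    have hKS : K ≤ S := by omega
    have hSK : S + K ≤ L.length := by omega
    rw [pvInnerA_eq_all, hkK, hsS]
    rw [show ((S : Int) - (K : Int)) = ((S - K : Nat) : Int) from by omega]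
    rw [show ((S : Int) + (K : Int)) = ((S + K : Nat) : Int) from by omega]
    rw [PySem.List.slice_natCast, PySem.List.slice_natCast]
    rw [show S - (S - K) = K from by omega, show S + K - S = K from by omega]
    rw [PySem.List.pyRange_one]
    rw [show ((K : Int) - 0).toNat = K from by omega]
    rw [Bool.eq_iff_iff]
    simp only [zero_add, List.all_map, List.all_eq_true, List.mem_range, Function.comp_apply,
      beq_iff_eq, Bool.or_eq_true, decide_eq_true_eq]
    rw [pvMirror_iff L S K hK hKS hSK]
    constructor
    · intro h
      refine Or.inr ?_
      intro j hj
      have hx := h j hj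
      rw [show ((S : Int) - (j : Int) - 1) = ((S - 1 - j : Nat) : Int) from by omega,
          show ((S : Int) + (j : Int)) = ((S + j : Nat) : Int) from by omega,
          PySem.List.pyGet?_natCast, PySem.List.pyGet?_natCast] at hx
      exact hx
    · rintro (h | h) j hj
      · omega
      · have hx := h j hj
        rw [show ((S : Int) - (j : Int) - 1) = ((S - 1 - j : Nat) : Int) from by omega,
            show ((S : Int) + (j : Int)) = ((S + j : Nat) : Int) from by omega,
            PySem.List.pyGet?_natCast, PySem.List.pyGet?_natCast]
        exact hx

-- ===== VERDICT (by name: the statement is the Claim_ definition above) =====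
theorem palindrome_offsets_spec : Claim_equal_palindrome_offsets := by
  intro line seeds _
  unfold Spec_palindrome_offsets palindrome_offsets palindrome_offsets_alt
  rw [PySem.List.foldl_append_if_eq_filter]
  simp only [List.nil_append]
  exact List.filter_congr (fun s _ => pvTest_eq line s)
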